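-- pv_equiv track=rewrite | github.com/Sinha-Kunal/DevSoc-25-Cardi-A | Hardware/code_integrated.py | heart_rate_detection
-- ===== SOURCE A (Python) =====
-- def heart_rate_detection(arr):
--     if len(arr) < 2:
--         return False
--     zero_to_nonzero = False
--     nonzero_to_zero = False
--     for i in range(len(arr) - 1):
--         current = arr[i]
--         next_num = arr[i + 1]
--         if current == 0 and next_num != 0:
--             zero_to_nonzero = True
--         elif current != 0 and next_num == 0:
--             nonzero_to_zero = True
--     return (zero_to_nonzero and nonzero_to_zero)
-- ===== SOURCE B (Python) =====
-- def heart_rate_detection(arr):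
--     # Count runs of consecutive zero/nonzero elements; both transition
--     # directions exist exactly when there are at least 3 alternating runs.
--     runs = 0
--     prev_key = None
--     for x in arr:
--         k = (x == 0)
--         if k != prev_key:
--             runs += 1
--             prev_key = k
--     return runs >= 3
-- ===== Notes on version B (the rewrite author's own statement) =====
-- stated objective: simpler
-- what changed: Replaces the two-flag scan over index pairs (needing a len<2 guard) with a single run-counting pass over the elements: group into alternating zero/nonzero runs and return True iff there are at least 3 runs.
import Mathlib
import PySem

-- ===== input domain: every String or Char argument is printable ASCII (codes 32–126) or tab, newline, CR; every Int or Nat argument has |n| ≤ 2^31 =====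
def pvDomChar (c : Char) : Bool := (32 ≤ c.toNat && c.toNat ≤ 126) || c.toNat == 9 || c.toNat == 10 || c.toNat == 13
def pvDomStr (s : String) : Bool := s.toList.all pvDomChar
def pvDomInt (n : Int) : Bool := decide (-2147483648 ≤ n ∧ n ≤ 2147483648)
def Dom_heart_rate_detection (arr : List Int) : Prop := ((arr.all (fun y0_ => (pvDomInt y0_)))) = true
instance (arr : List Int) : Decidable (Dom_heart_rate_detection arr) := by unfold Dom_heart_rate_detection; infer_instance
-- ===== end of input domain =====

-- B replaces A's two-flag adjacent-pair scan by a single run-counting pass (≥ 3 alternating runs); objective: simpler.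

-- ===== PORT A =====
-- loop body of A's for-loop (flags update for the pair (current, next_num))
def hrStepA (st : Bool × Bool) (current next_num : Int) : Bool × Bool :=
  if current == 0 && next_num != 0 then (true, st.2)
  else if current != 0 && next_num == 0 then (st.1, true)
  else st

def heart_rate_detection (arr : List Int) : Bool :=
  if arr.length < 2 then false
  else
    let st := (PySem.List.pyRange 0 ((arr.length : Int) - 1) 1).foldl
      (fun st i => hrStepA st (PySem.List.pyGetD arr i 0) (PySem.List.pyGetD arr (i + 1) 0))
      (false, false)
    st.1 && st.2

-- ===== PORT B =====
-- loop body of B's for-loop: state = (runs, prev_key); None → Option.none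
def hrStepB (st : Nat × Option Bool) (x : Int) : Nat × Option Bool :=
  let k := x == 0
  if some k ≠ st.2 then (st.1 + 1, some k) else st

def heart_rate_detection_alt (arr : List Int) : Bool :=
  let st := arr.foldl hrStepB (0, none)
  decide (3 ≤ st.1)

-- ===== PRECONDITION & SPEC =====
def Spec_heart_rate_detection (arr : List Int) (out : Bool) : Prop := out = heart_rate_detection_alt arr
instance (arr : List Int) (out : Bool) : Decidable (Spec_heart_rate_detection arr out) := by unfold Spec_heart_rate_detection; infer_instance

-- ===== CLAIM (what is proved, stated in full; the proofs are below) =====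
def Claim_equal_heart_rate_detection : Prop := ∀ (arr : List Int), Dom_heart_rate_detection arr → Spec_heart_rate_detection arr (heart_rate_detection arr)

-- ===== LEMMAS AND PROOFS =====

-- A's index loop over range(len(arr)-1) equals a fold over adjacent pairs.
theorem fold_idx_pairs (arr : List Int) (init : Bool × Bool) :
    (List.range (arr.length - 1)).foldl
        (fun st k => hrStepA st (arr.getD k 0) (arr.getD (k + 1) 0)) init
      = (arr.zip arr.tail).foldl (fun st p => hrStepA st p.1 p.2) init := by
  induction arr generalizing init with
  | nil => simp
  | cons x l ih =>
    cases l with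
    | nil => simp
    | cons y t =>
      have hlen : (x :: y :: t).length - 1 = ((y :: t).length - 1) + 1 := by
        simp
      rw [hlen, List.range_succ_eq_map, List.foldl_cons, List.foldl_map]
      simpa [List.getD_cons_succ] using ih (hrStepA init x y)

-- Core invariant: with fz = the key of the first element, after 'runs' runs the
-- flags of A's scan are determined by 'runs', and parity fixes the current key.
theorem main_inv (l : List Int) : ∀ (x : Int) (fz : Bool) (runs : Nat) (a b : Bool),
    ((x == 0) = (fz == decide (runs % 2 = 1))) →
    (a = cond fz (decide (2 ≤ runs)) (decide (3 ≤ runs))) →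
    (b = cond fz (decide (3 ≤ runs)) (decide (2 ≤ runs))) →
    1 ≤ runs →
    (let st := ((x :: l).zip l).foldl (fun st p => hrStepA st p.1 p.2) (a, b)
     st.1 && st.2)
      = decide (3 ≤ (l.foldl hrStepB (runs, some (x == 0))).1) := by
  induction l with
  | nil =>
    intro x fz runs a b h1 ha hb hr
    simp only [List.zip_nil_right, List.foldl_nil]
    subst ha hb
    by_cases h3 : 3 ≤ runs
    · have h2 : 2 ≤ runs := by omega
      cases fz <;> simp [h2, h3]
    · cases fz <;> simp [h3]
  | cons y t ih =>
    intro x fz runs a b h1 ha hb hr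
    simp only [List.zip_cons_cons, List.foldl_cons]
    by_cases hk : (y == 0) = (x == 0)
    · -- same key: no transition in A, no new run in B
      have hA : hrStepA (a, b) x y = (a, b) := by
        cases hx : (x == 0) <;> rw [hx] at hk <;> simp [hrStepA, bne, hx, hk]
      have hB : hrStepB (runs, some (x == 0)) y = (runs, some (y == 0)) := by
        simp [hrStepB, hk]
      simp only [hA, hB]
      exact ih y fz runs a b (hk.trans h1) ha hb hr
    · -- key flips: exactly one of A's flags fires, B opens a new run
      have hky : (y == 0) = !(x == 0) := by
        cases hy : (y == 0) <;> cases hx2 : (x == 0) <;> simp [hy, hx2] at hk ⊢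
      cases hx : (x == 0)
      · -- x ≠ 0 : y = 0, nonzero_to_zero fires
        rw [hx] at h1 hky
        have hy : (y == 0) = true := by rw [hky]; rfl
        have hB : hrStepB (runs, some false) y = (runs + 1, some (y == 0)) := by
          simp [hrStepB, hy]
        have hA : hrStepA (a, b) x y = (a, true) := by
          simp [hrStepA, bne, hx, hy]
        simp only [hA, hB]
        cases fz
        · -- fz = false : runs is odd
          simp only [Bool.cond_false] at ha hb
          simp at h1
          refine ih y false (runs + 1) a true ?_ ?_ ?_ (by omega)
          · rw [hy]
            have h0 : (runs + 1) % 2 = 0 := by omega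
            simp [h0]
          · simp only [Bool.cond_false]
            rw [ha, decide_eq_decide]
            omega
          · simp only [Bool.cond_false]
            simp
            omega
        · -- fz = true : runs is even (≥ 2)
          simp only [Bool.cond_true] at ha hb
          simp at h1
          refine ih y true (runs + 1) a true ?_ ?_ ?_ (by omega)
          · rw [hy]
            have h0 : (runs + 1) % 2 = 1 := by omega
            simp [h0]
          · simp only [Bool.cond_true]
            rw [ha, decide_eq_decide]
            omega
          · simp only [Bool.cond_true]
            simp
            omega
      · -- x = 0 : y ≠ 0, zero_to_nonzero fires
        rw [hx] at h1 hky
        have hy : (y == 0) = false := by rw [hky]; rfl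
        have hB : hrStepB (runs, some true) y = (runs + 1, some (y == 0)) := by
          simp [hrStepB, hy]
        have hA : hrStepA (a, b) x y = (true, b) := by
          simp [hrStepA, bne, hx, hy]
        simp only [hA, hB]
        cases fz
        · -- fz = false : runs is even (≥ 2)
          simp only [Bool.cond_false] at ha hb
          simp at h1
          refine ih y false (runs + 1) true b ?_ ?_ ?_ (by omega)
          · rw [hy]
            have h0 : (runs + 1) % 2 = 1 := by omega
            simp [h0]
          · simp only [Bool.cond_false]
            simp
            omega
          · simp only [Bool.cond_false]
            rw [hb, decide_eq_decide]
            omega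
        · -- fz = true : runs is odd
          simp only [Bool.cond_true] at ha hb
          simp at h1
          refine ih y true (runs + 1) true b ?_ ?_ ?_ (by omega)
          · rw [hy]
            have h0 : (runs + 1) % 2 = 0 := by omega
            simp [h0]
          · simp only [Bool.cond_true]
            simp
            omega
          · simp only [Bool.cond_true]
            rw [hb, decide_eq_decide]
            omega

-- ===== VERDICT (by name: the statement is the Claim_ definition above) =====
theorem heart_rate_detection_spec : Claim_equal_heart_rate_detection := by
  intro arr _
  unfold Spec_heart_rate_detection heart_rate_detection heart_rate_detection_alt
  match arr with
  | [] => simp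
  | [x] => simp [hrStepB]
  | x :: y :: t =>
    have hlen : ¬ (x :: y :: t).length < 2 := by simp
    simp only [hlen, if_false]
    -- bridge the pyRange index loop to the Nat range loop, then to adjacent pairs
    have hbridge :
        (PySem.List.pyRange 0 (((x :: y :: t).length : Int) - 1) 1).foldl
            (fun st i => hrStepA st (PySem.List.pyGetD (x :: y :: t) i 0)
              (PySem.List.pyGetD (x :: y :: t) (i + 1) 0)) (false, false)
          = ((x :: y :: t).zip (x :: y :: t).tail).foldl
              (fun st p => hrStepA st p.1 p.2) (false, false) := by
      rw [PySem.List.pyRange_one, List.foldl_map]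
      have htn : (((x :: y :: t).length : Int) - 1 - 0).toNat = (x :: y :: t).length - 1 := by
        simp
      rw [htn, ← fold_idx_pairs]
      apply List.foldl_ext
      intro st k _
      have h2 : ((0 : Int) + (k : Int) + 1) = ((k + 1 : Nat) : Int) := by push_cast; ring
      have h1 : ((0 : Int) + (k : Int)) = ((k : Nat) : Int) := by ring
      rw [h2, h1, PySem.List.pyGetD_natCast, PySem.List.pyGetD_natCast]
    rw [hbridge]
    -- B's first iteration: runs {0 → 1}, prev_key {None → key of x}
    have hfirst : (x :: y :: t).foldl hrStepB (0, none)
        = (y :: t).foldl hrStepB (1, some (x == 0)) := by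
      simp [hrStepB]
    rw [hfirst]
    exact main_inv (y :: t) x (x == 0) 1 false false (by simp)
      (by cases (x == 0) <;> rfl) (by cases (x == 0) <;> rfl) (le_refl 1)
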